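-- pv_equiv track=rewrite | github.com/Jeremylaby/ASD_2023 | Python/kol2/kol2.py | convert_to_edges
-- ===== SOURCE A (Python) =====
-- def convert_to_edges(G):
--     edges=[]
--     edges2=[]
--     for i in range(len(G)):
--         for j in range(len(G[i])):
--             edges.append((i,G[i][j][0],G[i][j][1]))
--             if G[i][j][0]>i:
--                 edges2.append((i,G[i][j][0],G[i][j][1]))
--
--     return edges,edges2
-- ===== SOURCE B (Python) =====
-- def convert_to_edges(G):
--     # Divide and conquer over the row index range: solve each half, concatenate.
--     def solve(lo, hi):
--         if lo == hi:
--             return [], []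
--         if hi - lo == 1:
--             es = [(lo, d, w) for d, w in G[lo]]
--             return es, [e for e in es if e[1] > lo]
--         mid = (lo + hi) // 2
--         l1, l2 = solve(lo, mid)
--         r1, r2 = solve(mid, hi)
--         return l1 + r1, l2 + r2
--     return solve(0, len(G))
-- ===== Notes on version B (the rewrite author's own statement) =====
-- stated objective: alternative
-- what changed: Replaces A's single interleaved nested index loop with a divide-and-conquer recursion over the row-index range: each half is solved independently and the (edges, edges2) pairs of the halves are concatenated, with a single-row base case building the row's edges and deriving its edges2 from them.
import Mathlib
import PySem

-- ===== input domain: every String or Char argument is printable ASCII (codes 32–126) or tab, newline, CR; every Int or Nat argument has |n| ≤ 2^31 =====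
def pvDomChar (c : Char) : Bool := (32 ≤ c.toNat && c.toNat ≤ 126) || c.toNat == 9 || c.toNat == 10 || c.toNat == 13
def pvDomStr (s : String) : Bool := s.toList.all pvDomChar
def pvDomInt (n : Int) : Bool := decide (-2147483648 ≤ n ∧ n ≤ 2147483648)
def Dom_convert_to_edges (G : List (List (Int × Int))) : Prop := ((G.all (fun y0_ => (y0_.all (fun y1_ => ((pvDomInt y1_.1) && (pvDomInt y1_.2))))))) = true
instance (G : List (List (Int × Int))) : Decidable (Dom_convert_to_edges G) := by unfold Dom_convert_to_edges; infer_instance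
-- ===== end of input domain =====

-- B replaces A's single interleaved nested loop by a divide-and-conquer recursion over the row-index range (objective: alternative).


-- ===== PORT A =====
-- literal port of A's nested index loops (G[i][j] re-indexed at each use, as in the Python);
-- indices produced by range(len(..)) are always in range, so pyGetD's default is never read
def convert_to_edges (G : List (List (Int × Int))) : (List (Int × Int × Int)) × (List (Int × Int × Int)) :=
  (PySem.List.pyRange 0 (PySem.List.len G)).foldl
    (fun st i =>
      (PySem.List.pyRange 0 (PySem.List.len (PySem.List.pyGetD G i []))).foldl
        (fun st j =>
          (st.1 ++ [(i, (PySem.List.pyGetD (PySem.List.pyGetD G i []) j (0, 0)).1,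
                        (PySem.List.pyGetD (PySem.List.pyGetD G i []) j (0, 0)).2)],
           if (PySem.List.pyGetD (PySem.List.pyGetD G i []) j (0, 0)).1 > i then
             st.2 ++ [(i, (PySem.List.pyGetD (PySem.List.pyGetD G i []) j (0, 0)).1,
                          (PySem.List.pyGetD (PySem.List.pyGetD G i []) j (0, 0)).2)]
           else st.2))
        st)
    ([], [])

-- ===== PORT B =====
-- Source B's recursive helper 'solve(lo, hi)'; the first branch tests hi - lo ≤ 0 instead of
-- lo == hi only to make the recursion total on unreachable arguments (solve keeps lo ≤ hi)
def pvSolve (G : List (List (Int × Int))) (lo hi : Int) :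
    (List (Int × Int × Int)) × (List (Int × Int × Int)) :=
  if _h0 : hi - lo ≤ 0 then ([], [])
  else if _h1 : hi - lo = 1 then
    let es := (PySem.List.pyGetD G lo []).map (fun e => (lo, e.1, e.2))
    (es, es.filter (fun e => decide (e.2.1 > lo)))
  else
    let mid := PySem.Int.floordiv (lo + hi) 2
    let l := pvSolve G lo mid
    let r := pvSolve G mid hi
    (l.1 ++ r.1, l.2 ++ r.2)
termination_by (hi - lo).toNat
decreasing_by
  · have hm := PySem.Int.floordiv_two_mid_bounds (lo := lo) (hi := hi) (by omega)
    have he : PySem.Int.floordiv (lo + hi) 2 = (lo + hi) / 2 :=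
      PySem.Int.floordiv_eq_ediv_of_pos (by omega)
    rw [he] at hm ⊢; omega
  · have hm := PySem.Int.floordiv_two_mid_bounds (lo := lo) (hi := hi) (by omega)
    have he : PySem.Int.floordiv (lo + hi) 2 = (lo + hi) / 2 :=
      PySem.Int.floordiv_eq_ediv_of_pos (by omega)
    rw [he] at hm ⊢; omega

def convert_to_edges_alt (G : List (List (Int × Int))) :
    (List (Int × Int × Int)) × (List (Int × Int × Int)) :=
  pvSolve G 0 (PySem.List.len G)

-- ===== PRECONDITION & SPEC =====
def Spec_convert_to_edges (G : List (List (Int × Int))) (out : (List (Int × Int × Int)) × (List (Int × Int × Int))) : Prop := out = convert_to_edges_alt G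
instance (G : List (List (Int × Int))) (out : (List (Int × Int × Int)) × (List (Int × Int × Int))) : Decidable (Spec_convert_to_edges G out) := by unfold Spec_convert_to_edges; infer_instance

-- ===== CLAIM (what is proved, stated in full; the proofs are below) =====
def Claim_equal_convert_to_edges : Prop := ∀ (G : List (List (Int × Int))), Dom_convert_to_edges G → Spec_convert_to_edges G (convert_to_edges G)

-- ===== LEMMAS AND PROOFS =====

abbrev pvSt : Type := List (Int × Int × Int) × List (Int × Int × Int)

-- per-row closed forms: the edges of row i, and those with destination > i
def pvE (G : List (List (Int × Int))) (i : Int) : List (Int × Int × Int) :=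
  (PySem.List.pyGetD G i []).map (fun e => (i, e.1, e.2))

def pvE2 (G : List (List (Int × Int))) (i : Int) : List (Int × Int × Int) :=
  ((PySem.List.pyGetD G i []).filter (fun e => decide (e.1 > i))).map (fun e => (i, e.1, e.2))

-- A's inner row loop in closed form
theorem pvInner_eq (G : List (List (Int × Int))) (st : pvSt) (i : Int) :
    (PySem.List.pyRange 0 (PySem.List.len (PySem.List.pyGetD G i []))).foldl
      (fun st j =>
        (st.1 ++ [(i, (PySem.List.pyGetD (PySem.List.pyGetD G i []) j (0, 0)).1,
                      (PySem.List.pyGetD (PySem.List.pyGetD G i []) j (0, 0)).2)],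
         if (PySem.List.pyGetD (PySem.List.pyGetD G i []) j (0, 0)).1 > i then
           st.2 ++ [(i, (PySem.List.pyGetD (PySem.List.pyGetD G i []) j (0, 0)).1,
                        (PySem.List.pyGetD (PySem.List.pyGetD G i []) j (0, 0)).2)]
         else st.2))
      st
    = (st.1 ++ pvE G i, st.2 ++ pvE2 G i) := by
  refine Eq.trans
    (PySem.List.foldl_pyRange_zero_pyGetD' (PySem.List.pyGetD G i []) (0, 0)
      (fun st e =>
        (st.1 ++ [(i, e.1, e.2)], if e.1 > i then st.2 ++ [(i, e.1, e.2)] else st.2)) st) ?_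
  rw [PySem.List.foldl_prod_mk (f := fun acc (e : Int × Int) => acc ++ [(i, e.1, e.2)])
      (g := fun acc (e : Int × Int) => if e.1 > i then acc ++ [(i, e.1, e.2)] else acc)]
  rw [PySem.List.foldl_append_singleton_eq_map, PySem.List.foldl_append_ite]
  rfl

-- A in closed form
theorem convert_to_edges_eq (G : List (List (Int × Int))) :
    convert_to_edges G
      = ((PySem.List.pyRange 0 (PySem.List.len G)).flatMap (pvE G),
         (PySem.List.pyRange 0 (PySem.List.len G)).flatMap (pvE2 G)) := by
  unfold convert_to_edges
  have hb : (fun (st : pvSt) (i : Int) =>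
      (PySem.List.pyRange 0 (PySem.List.len (PySem.List.pyGetD G i []))).foldl
        (fun st j =>
          (st.1 ++ [(i, (PySem.List.pyGetD (PySem.List.pyGetD G i []) j (0, 0)).1,
                        (PySem.List.pyGetD (PySem.List.pyGetD G i []) j (0, 0)).2)],
           if (PySem.List.pyGetD (PySem.List.pyGetD G i []) j (0, 0)).1 > i then
             st.2 ++ [(i, (PySem.List.pyGetD (PySem.List.pyGetD G i []) j (0, 0)).1,
                          (PySem.List.pyGetD (PySem.List.pyGetD G i []) j (0, 0)).2)]
           else st.2))
        st)
      = fun (st : pvSt) (i : Int) => (st.1 ++ pvE G i, st.2 ++ pvE2 G i) := by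
    funext st i; exact pvInner_eq G st i
  rw [hb]
  rw [PySem.List.foldl_prod_mk (f := fun acc (i : Int) => acc ++ pvE G i)
      (g := fun acc (i : Int) => acc ++ pvE2 G i)]
  rw [PySem.List.foldl_append_eq_flatMap, PySem.List.foldl_append_eq_flatMap]
  simp

-- B's recursion computes the same closed form on every range with 0 ≤ lo
theorem pvSolve_eq (G : List (List (Int × Int))) :
    ∀ (n : Nat) (lo hi : Int), (hi - lo).toNat = n →
      pvSolve G lo hi
        = ((PySem.List.pyRange lo hi).flatMap (pvE G),
           (PySem.List.pyRange lo hi).flatMap (pvE2 G)) := by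
  intro n
  induction n using Nat.strong_induction_on with
  | _ n ih =>
    intro lo hi hn
    rw [pvSolve]
    by_cases h0 : hi - lo ≤ 0
    · rw [dif_pos h0, PySem.List.pyRange_one_eq_nil (by omega)]; simp
    · rw [dif_neg h0]
      by_cases h1 : hi - lo = 1
      · rw [dif_pos h1]
        have hhi : hi = lo + 1 := by omega
        rw [hhi, PySem.List.pyRange_one_singleton]
        simp only [List.flatMap_cons, List.flatMap_nil, List.append_nil]
        unfold pvE pvE2
        rw [List.filter_map]
        rfl
      · rw [dif_neg h1]
        have hm := PySem.Int.floordiv_two_mid_bounds (lo := lo) (hi := hi) (by omega)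
        have he : PySem.Int.floordiv (lo + hi) 2 = (lo + hi) / 2 :=
          PySem.Int.floordiv_eq_ediv_of_pos (by omega)
        rw [he] at hm
        set mid := (lo + hi) / 2 with hmid
        have hl := ih (mid - lo).toNat (by omega) lo mid rfl
        have hr := ih (hi - mid).toNat (by omega) mid hi rfl
        simp only [he, hl, hr]
        rw [PySem.List.pyRange_one_append lo mid hi (by omega) (by omega)]
        simp [List.flatMap_append]

-- ===== VERDICT (by name: the statement is the Claim_ definition above) =====
theorem convert_to_edges_spec : Claim_equal_convert_to_edges := by
  intro G _
  unfold Spec_convert_to_edges convert_to_edges_alt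
  rw [convert_to_edges_eq, pvSolve_eq G ((PySem.List.len G - 0).toNat) 0 (PySem.List.len G) rfl]
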